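-- pv_equiv track=rewrite | github.com/MitsuhiroItagaki/test02 | explain_summarizer.py | extract_cost_statistics_from_explain_cost
-- ===== SOURCE A (Python) =====
-- def extract_cost_statistics_from_explain_cost(explain_cost_content: str) -> str:
--     """
--     EXPLAIN COST結果から統計情報を抽出して構造化（改善版）
--     """
--     if not explain_cost_content:
--         return ""
--
--     statistics_info = []
--
--     try:
--         lines = explain_cost_content.split('\n')
--
--         for line in lines:
--             line = line.strip()
--             if not line:
--                 continue
--
--             # テーブル統計情報の抽出（改善）
--             if 'statistics=' in line.lower() or 'stats=' in line.lower() or 'Statistics(' in line: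
--                 statistics_info.append(f"📊 テーブル統計: {line}")
--
--             # 行数情報の抽出（改善）
--             elif 'rows=' in line.lower() or 'rowcount=' in line.lower() or 'rows:' in line.lower():
--                 statistics_info.append(f"📈 行数情報: {line}")
--
--             # サイズ情報の抽出（改善）
--             elif ('size=' in line.lower() or 'sizeinbytes=' in line.lower() or 'sizeInBytes=' in line
--                   or 'GB' in line or 'MB' in line or 'size:' in line.lower()):
--                 statistics_info.append(f"💾 サイズ情報: {line}")
--
--             # コスト情報の抽出（改善）
--             elif ('cost=' in line.lower() or 'Cost(' in line or 'cost:' in line.lower()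
--                   or 'costs:' in line.lower() or 'estimated cost' in line.lower()):
--                 statistics_info.append(f"💰 コスト情報: {line}")
--
--             # 選択率情報の抽出（改善）
--             elif ('selectivity=' in line.lower() or 'filter=' in line.lower() or 'selectivity:' in line.lower()
--                   or 'selection' in line.lower()):
--                 statistics_info.append(f"🎯 選択率情報: {line}")
--
--             # パーティション情報の抽出（改善）
--             elif ('partition' in line.lower() and ('count' in line.lower() or 'size' in line.lower()
--                   or 'average' in line.lower() or 'per partition' in line.lower())):
--                 statistics_info.append(f"🔄 パーティション情報: {line}")
--
--             # メモリ情報の抽出（新規追加）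
--             elif ('memory' in line.lower() or 'spill' in line.lower() or 'threshold' in line.lower()):
--                 statistics_info.append(f"💾 メモリ情報: {line}")
--
--             # JOIN情報の抽出（新規追加）
--             elif ('join' in line.lower() and ('cost' in line.lower() or 'selectivity' in line.lower()
--                   or 'input' in line.lower() or 'output' in line.lower())):
--                 statistics_info.append(f"🔗 JOIN情報: {line}")
--
--     except Exception as e:
--         statistics_info.append(f"⚠️ 統計情報抽出エラー: {str(e)}")
--
--     return '\n'.join(statistics_info) if statistics_info else "統計情報が見つかりませんでした"
-- ===== SOURCE B (Python) =====
-- # B: two-phase re-implementation — phase 1 extracts the set of matched vocabulary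
-- # tokens per line (one pass over a needle lexicon), phase 2 classifies that token
-- # set by set algebra (gate subset + any-of intersection) over an ordered category
-- # table, instead of A's single elif cascade of inline substring tests.
--
-- # vocabulary: (needle, case_sensitive)
-- _NEEDLES = [
--     ('statistics=', False), ('stats=', False), ('Statistics(', True),
--     ('rows=', False), ('rowcount=', False), ('rows:', False),
--     ('size=', False), ('sizeinbytes=', False), ('sizeInBytes=', True),
--     ('GB', True), ('MB', True), ('size:', False),
--     ('cost=', False), ('Cost(', True), ('cost:', False), ('costs:', False),
--     ('estimated cost', False),
--     ('selectivity=', False), ('filter=', False), ('selectivity:', False),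
--     ('selection', False),
--     ('partition', False), ('count', False), ('size', False), ('average', False),
--     ('per partition', False),
--     ('memory', False), ('spill', False), ('threshold', False),
--     ('join', False), ('cost', False), ('selectivity', False),
--     ('input', False), ('output', False),
-- ]
--
-- # (prefix, gates: all must be present, anyof: at least one must be present)
-- _CATEGORIES = [
--     ("📊 テーブル統計: ", frozenset(), frozenset({'statistics=', 'stats=', 'Statistics('})),
--     ("📈 行数情報: ", frozenset(), frozenset({'rows=', 'rowcount=', 'rows:'})),
--     ("💾 サイズ情報: ", frozenset(), frozenset({'size=', 'sizeinbytes=', 'sizeInBytes=', 'GB', 'MB', 'size:'})),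
--     ("💰 コスト情報: ", frozenset(), frozenset({'cost=', 'Cost(', 'cost:', 'costs:', 'estimated cost'})),
--     ("🎯 選択率情報: ", frozenset(), frozenset({'selectivity=', 'filter=', 'selectivity:', 'selection'})),
--     ("🔄 パーティション情報: ", frozenset({'partition'}), frozenset({'count', 'size', 'average', 'per partition'})),
--     ("💾 メモリ情報: ", frozenset(), frozenset({'memory', 'spill', 'threshold'})),
--     ("🔗 JOIN情報: ", frozenset({'join'}), frozenset({'cost', 'selectivity', 'input', 'output'})),
-- ]
--
--
-- def _features(line):
--     low = line.lower()
--     return {n for (n, cs) in _NEEDLES if n in (line if cs else low)}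
--
--
-- def _classify(found):
--     for prefix, gates, anyof in _CATEGORIES:
--         if gates <= found and found & anyof:
--             return prefix
--     return None
--
--
-- def extract_cost_statistics_from_explain_cost(explain_cost_content: str) -> str:
--     if not explain_cost_content:
--         return ""
--     statistics_info = []
--     for raw in explain_cost_content.split('\n'):
--         line = raw.strip()
--         if not line:
--             continue
--         prefix = _classify(_features(line))
--         if prefix is not None:
--             statistics_info.append(prefix + line)
--     return '\n'.join(statistics_info) if statistics_info else "統計情報が見つかりませんでした"
-- ===== Notes on version B (the rewrite author's own statement) =====
-- stated objective: alternative
-- what changed: A's inline elif cascade of substring tests is replaced by a two-phase design: each line is first reduced to the set of vocabulary tokens it contains (one filter over a needle lexicon), and the category is then decided purely by set algebra (gate-subset plus any-of-intersection) over an ordered category table.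
import Mathlib
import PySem

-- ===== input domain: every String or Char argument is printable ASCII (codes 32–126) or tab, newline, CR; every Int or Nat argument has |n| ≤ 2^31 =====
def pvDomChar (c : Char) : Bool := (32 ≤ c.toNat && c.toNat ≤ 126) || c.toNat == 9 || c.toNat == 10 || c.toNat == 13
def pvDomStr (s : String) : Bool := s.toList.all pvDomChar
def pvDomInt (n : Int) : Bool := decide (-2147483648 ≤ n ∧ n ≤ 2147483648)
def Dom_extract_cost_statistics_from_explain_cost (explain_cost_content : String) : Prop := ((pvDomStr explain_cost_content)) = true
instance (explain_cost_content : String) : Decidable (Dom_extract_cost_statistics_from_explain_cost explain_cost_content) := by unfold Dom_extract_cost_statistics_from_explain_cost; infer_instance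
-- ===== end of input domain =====

-- B replaces A's inline elif cascade by a two-phase design: per line, extract the set of
-- matched vocabulary tokens (one filter over a needle lexicon), then classify that set by
-- set algebra over an ordered category table (objective: alternative).
-- A's try/except can never fire (no statement inside raises), so it has no port.

-- ===== PORT A =====
-- per-line body of A's loop after 'line = line.strip()': skip empties, then the elif cascade
-- ('line.lower()' is recomputed at each use, as in the Python)
def pvLineA (acc : List String) (line : String) : List String :=
  if line = "" then acc
  else if PySem.Str.isIn "statistics=" (PySem.Str.lower line) || PySem.Str.isIn "stats=" (PySem.Str.lower line)
      || PySem.Str.isIn "Statistics(" line then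
    acc ++ ["📊 テーブル統計: " ++ line]
  else if PySem.Str.isIn "rows=" (PySem.Str.lower line) || PySem.Str.isIn "rowcount=" (PySem.Str.lower line)
      || PySem.Str.isIn "rows:" (PySem.Str.lower line) then
    acc ++ ["📈 行数情報: " ++ line]
  else if PySem.Str.isIn "size=" (PySem.Str.lower line) || PySem.Str.isIn "sizeinbytes=" (PySem.Str.lower line)
      || PySem.Str.isIn "sizeInBytes=" line || PySem.Str.isIn "GB" line || PySem.Str.isIn "MB" line
      || PySem.Str.isIn "size:" (PySem.Str.lower line) then
    acc ++ ["💾 サイズ情報: " ++ line]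
  else if PySem.Str.isIn "cost=" (PySem.Str.lower line) || PySem.Str.isIn "Cost(" line
      || PySem.Str.isIn "cost:" (PySem.Str.lower line) || PySem.Str.isIn "costs:" (PySem.Str.lower line)
      || PySem.Str.isIn "estimated cost" (PySem.Str.lower line) then
    acc ++ ["💰 コスト情報: " ++ line]
  else if PySem.Str.isIn "selectivity=" (PySem.Str.lower line) || PySem.Str.isIn "filter=" (PySem.Str.lower line)
      || PySem.Str.isIn "selectivity:" (PySem.Str.lower line) || PySem.Str.isIn "selection" (PySem.Str.lower line) then
    acc ++ ["🎯 選択率情報: " ++ line]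
  else if PySem.Str.isIn "partition" (PySem.Str.lower line) && (PySem.Str.isIn "count" (PySem.Str.lower line)
      || PySem.Str.isIn "size" (PySem.Str.lower line) || PySem.Str.isIn "average" (PySem.Str.lower line)
      || PySem.Str.isIn "per partition" (PySem.Str.lower line)) then
    acc ++ ["🔄 パーティション情報: " ++ line]
  else if PySem.Str.isIn "memory" (PySem.Str.lower line) || PySem.Str.isIn "spill" (PySem.Str.lower line)
      || PySem.Str.isIn "threshold" (PySem.Str.lower line) then
    acc ++ ["💾 メモリ情報: " ++ line]
  else if PySem.Str.isIn "join" (PySem.Str.lower line) && (PySem.Str.isIn "cost" (PySem.Str.lower line)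
      || PySem.Str.isIn "selectivity" (PySem.Str.lower line) || PySem.Str.isIn "input" (PySem.Str.lower line)
      || PySem.Str.isIn "output" (PySem.Str.lower line)) then
    acc ++ ["🔗 JOIN情報: " ++ line]
  else acc

-- one iteration of A's 'for line in lines': strip, then the cascade above
def pvStepA (acc : List String) (rawLine : String) : List String :=
  pvLineA acc (PySem.Str.strip rawLine)

def extract_cost_statistics_from_explain_cost (explain_cost_content : String) : String :=
  if explain_cost_content = "" then ""
  else
    -- split('\n') with a non-empty separator never returns none; getD keeps the port total
    let statistics_info := ((PySem.Str.split? explain_cost_content "\n").getD []).foldl pvStepA []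
    if statistics_info = [] then "統計情報が見つかりませんでした"
    else PySem.Str.join "\n" statistics_info

-- ===== PORT B =====
-- Source B's _NEEDLES: (needle, case_sensitive)
def pvNeedles : List (String × Bool) :=
  [ ("statistics=", false), ("stats=", false), ("Statistics(", true),
    ("rows=", false), ("rowcount=", false), ("rows:", false),
    ("size=", false), ("sizeinbytes=", false), ("sizeInBytes=", true),
    ("GB", true), ("MB", true), ("size:", false),
    ("cost=", false), ("Cost(", true), ("cost:", false), ("costs:", false),
    ("estimated cost", false),
    ("selectivity=", false), ("filter=", false), ("selectivity:", false),
    ("selection", false),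
    ("partition", false), ("count", false), ("size", false), ("average", false),
    ("per partition", false),
    ("memory", false), ("spill", false), ("threshold", false),
    ("join", false), ("cost", false), ("selectivity", false),
    ("input", false), ("output", false) ]

-- Source B's _CATEGORIES: (prefix, gates, anyof); the frozensets are consumed only through
-- subset/any-intersection tests, so a list in written order is an exact port
def pvCategories : List (String × List String × List String) :=
  [ ("📊 テーブル統計: ", [], ["statistics=", "stats=", "Statistics("]),
    ("📈 行数情報: ", [], ["rows=", "rowcount=", "rows:"]),
    ("💾 サイズ情報: ", [], ["size=", "sizeinbytes=", "sizeInBytes=", "GB", "MB", "size:"]),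
    ("💰 コスト情報: ", [], ["cost=", "Cost(", "cost:", "costs:", "estimated cost"]),
    ("🎯 選択率情報: ", [], ["selectivity=", "filter=", "selectivity:", "selection"]),
    ("🔄 パーティション情報: ", ["partition"], ["count", "size", "average", "per partition"]),
    ("💾 メモリ情報: ", [], ["memory", "spill", "threshold"]),
    ("🔗 JOIN情報: ", ["join"], ["cost", "selectivity", "input", "output"]) ]

-- Source B's _features: the set of needles present in the line ('low' computed once)
def pvFeatures (line : String) : PySem.Set String :=
  let low := PySem.Str.lower line
  PySem.Set.ofList
    ((pvNeedles.filter (fun r => PySem.Str.isIn r.1 (if r.2 then line else low))).map Prod.fst)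

-- Source B's _classify: first category whose gates are a subset of found and whose anyof meets found
def pvClassify (found : PySem.Set String) : List (String × List String × List String) → Option String
  | [] => none
  | c :: cs =>
    if c.2.1.all (fun g => PySem.Set.contains found g)
        && c.2.2.any (fun a => PySem.Set.contains found a) then some c.1
    else pvClassify found cs

-- per-line body of B's loop after stripping: skip empties, classify the feature set
def pvLineB (acc : List String) (line : String) : List String :=
  if line = "" then acc
  else
    match pvClassify (pvFeatures line) pvCategories with
    | some pre => acc ++ [pre ++ line]
    | none => acc

def pvStepB (acc : List String) (rawLine : String) : List String :=
  pvLineB acc (PySem.Str.strip rawLine)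

def extract_cost_statistics_from_explain_cost_alt (explain_cost_content : String) : String :=
  if explain_cost_content = "" then ""
  else
    let statistics_info := ((PySem.Str.split? explain_cost_content "\n").getD []).foldl pvStepB []
    if statistics_info = [] then "統計情報が見つかりませんでした"
    else PySem.Str.join "\n" statistics_info

-- ===== PRECONDITION & SPEC =====
def Spec_extract_cost_statistics_from_explain_cost (explain_cost_content : String) (out : String) : Prop := out = extract_cost_statistics_from_explain_cost_alt explain_cost_content
instance (explain_cost_content : String) (out : String) : Decidable (Spec_extract_cost_statistics_from_explain_cost explain_cost_content out) := by unfold Spec_extract_cost_statistics_from_explain_cost; infer_instance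

-- ===== CLAIM (what is proved, stated in full; the proofs are below) =====
def Claim_equal_extract_cost_statistics_from_explain_cost : Prop := ∀ (explain_cost_content : String), Dom_extract_cost_statistics_from_explain_cost explain_cost_content → Spec_extract_cost_statistics_from_explain_cost explain_cost_content (extract_cost_statistics_from_explain_cost explain_cost_content)

-- ===== LEMMAS AND PROOFS =====
-- membership in the feature set, expressed over the needle lexicon
theorem pvFeatures_contains (line n : String) :
    PySem.Set.contains (pvFeatures line) n =
      pvNeedles.any (fun r => n == r.1
        && PySem.Str.isIn r.1 (if r.2 then line else PySem.Str.lower line)) := by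
  rw [Bool.eq_iff_iff]
  simp [pvFeatures, PySem.Set.contains, PySem.Set.mem_ofList, List.mem_filter, List.any_eq_true]
  aesop

-- A's elif cascade and B's classify-the-feature-set produce the same per-line result
set_option maxHeartbeats 4000000 in
theorem pvLine_eq (acc : List String) (line : String) : pvLineA acc line = pvLineB acc line := by
  unfold pvLineA pvLineB
  simp only [pvClassify, pvCategories, pvFeatures_contains, pvNeedles,
    List.all_nil, List.all_cons, List.any_nil, List.any_cons,
    Bool.and_true, Bool.true_and, Bool.or_false, Bool.or_assoc]
  simp only [String.reduceBEq, beq_self_eq_true, if_neg (by decide : ¬ (false = true)),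
    if_pos trivial, Bool.false_and, Bool.true_and, Bool.or_false, Bool.false_or]
  split_ifs <;> rfl

theorem pvStep_funext : pvStepA = pvStepB :=
  funext fun a => funext fun l => pvLine_eq a (PySem.Str.strip l)

-- ===== VERDICT (by name: the statement is the Claim_ definition above) =====
theorem extract_cost_statistics_from_explain_cost_spec : Claim_equal_extract_cost_statistics_from_explain_cost := by
  intro s _
  unfold Spec_extract_cost_statistics_from_explain_cost
  unfold extract_cost_statistics_from_explain_cost extract_cost_statistics_from_explain_cost_alt
  rw [pvStep_funext]
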